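-- pv_equiv track=rewrite | github.com/oceanbei333/leetcode | 773.滑动谜题.py | slidingPuzzle
-- ===== SOURCE A (Python) =====
-- from typing import List
--
-- def slidingPuzzle(board: List[List[int]]) -> int:
--     moves = ((1, 3), (0, 2, 4), (1, 5), (0, 4), (1, 3, 5), (2, 4))
--     target, step, visited = '123450', 0, set()
--     front = {''.join(str(num) for row in board for num in row)}
--     back = {target}
--     while front:
--         visited |= front
--         new_queue = set()
--         for word in front:
--             zero = word.index('0')
--             for next_ in moves[zero]:
--                 alist = list(word)
--                 alist[zero], alist[next_] = alist[next_], alist[zero]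
--                 new_word = ''.join(alist)
--                 if word in back:
--                     return step
--                 if new_word not in visited:
--                     new_queue.add(new_word)
--         front = new_queue
--         step += 1
--         if len(front) > len(back):
--             front, back = back, front
--     return -1
-- ===== SOURCE B (Python) =====
-- def slidingPuzzle(board):
--     moves = ((1, 3), (0, 2, 4), (1, 5), (0, 4), (1, 3, 5), (2, 4))
--     start = ''.join(str(num) for row in board for num in row)
--     target = '123450'
--     if start == target:
--         return 0
--     visited = {start}
--     frontier = [start]
--     dist = 0
--     while frontier:
--         dist += 1
--         nxt = []
--         for word in frontier:
--             z = word.index('0')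
--             for j in moves[z]:
--                 chars = list(word)
--                 chars[z], chars[j] = chars[j], chars[z]
--                 nw = ''.join(chars)
--                 if nw == target:
--                     return dist
--                 if nw not in visited:
--                     visited.add(nw)
--                     nxt.append(nw)
--         frontier = nxt
--     return -1
-- ===== Notes on version B (the rewrite author's own statement) =====
-- stated objective: simpler
-- what changed: B replaces A's bidirectional meet-in-the-middle BFS (two frontiers with size-based swapping and a shared visited set) by a plain unidirectional level-by-level BFS from the start state that returns dist+1 as soon as a neighbour equals the target. Pre_ admits exactly the boards whose digit-string encoding is at least 6 characters long with a '0' among its first six characters: elsewhere A raises (ValueError/IndexError), except for degenerate short self-loop encodings like [[0,0,0,0,0]] on which both programs return -1 anyway.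
-- outside the precondition, e.g. on slidingPuzzle([[0, 0, 0, 0, 0]]): A returns -1, B returns -1
import Mathlib
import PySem

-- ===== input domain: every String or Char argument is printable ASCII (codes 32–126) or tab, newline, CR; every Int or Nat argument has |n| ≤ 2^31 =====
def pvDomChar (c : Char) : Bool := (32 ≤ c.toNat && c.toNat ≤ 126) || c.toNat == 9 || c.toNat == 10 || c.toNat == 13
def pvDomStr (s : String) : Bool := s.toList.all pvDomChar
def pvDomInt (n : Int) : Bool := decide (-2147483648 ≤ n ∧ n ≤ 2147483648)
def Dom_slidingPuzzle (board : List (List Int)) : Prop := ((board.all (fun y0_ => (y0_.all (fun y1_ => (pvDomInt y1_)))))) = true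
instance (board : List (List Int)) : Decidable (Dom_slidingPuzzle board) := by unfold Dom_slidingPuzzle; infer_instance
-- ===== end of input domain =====

-- B replaces A's bidirectional meet-in-the-middle BFS (two frontiers, swapping, shared visited set)
-- by a plain single-frontier level-by-level BFS from the start state; same return value, no speed claim.

-- ===== PORT A =====
-- Helpers shared by both ports (these lines are identical in both Python sources):
-- the moves adjacency table, the board-to-word encoding ''.join(str(num) ...), the
-- target word '123450', word.index('0') and the two-position swap on list(word).

-- moves = ((1, 3), (0, 2, 4), (1, 5), (0, 4), (1, 3, 5), (2, 4)); moves[z] with z ≥ 6 raises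
-- IndexError in Python (excluded by Pre_); the [] default is only a totality guard.
def pvMoves (z : Nat) : List Nat :=
  match z with
  | 0 => [1, 3] | 1 => [0, 2, 4] | 2 => [1, 5] | 3 => [0, 4] | 4 => [1, 3, 5] | 5 => [2, 4]
  | _ => []

-- ''.join(str(num) for row in board for num in row), as a list of characters
def pvWordOf (board : List (List Int)) : List Char :=
  (board.flatMap (fun row => row.map (fun num => PySem.Int.toChars num))).flatten

-- target = '123450'
def pvTarget : List Char := "123450".toList

-- word.index('0'); Python raises ValueError when '0' is absent (excluded by Pre_),
-- the .getD 0 is only a totality guard for that case.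
def pvZero (word : List Char) : Nat := (PySem.List.index? word '0').getD 0

-- alist[i], alist[j] = alist[j], alist[i]; in-range i, j never hit the ' ' defaults under Pre_
def pvSwap (w : List Char) (i j : Nat) : List Char :=
  (w.set i (w.getD j ' ')).set j (w.getD i ' ')

-- for next_ in moves[zero]: ... ; returns none = "return step" was hit (word ∈ back)
def pvMovesLoopA (word : List Char) (zero : Nat) (back visited : PySem.Set (List Char)) :
    List Nat → PySem.Set (List Char) → Option (PySem.Set (List Char))
  | [], nq => some nq
  | j :: _js, nq =>
    let nw := pvSwap word zero j
    if PySem.Set.contains back word then none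
    else pvMovesLoopA word zero back visited _js
      (if !(PySem.Set.contains visited nw) then PySem.Set.add nq nw else nq)

-- for word in front: ...
def pvWordsA (back visited : PySem.Set (List Char)) :
    List (List Char) → PySem.Set (List Char) → Option (PySem.Set (List Char))
  | [], nq => some nq
  | w :: ws, nq =>
    match pvMovesLoopA w (pvZero w) back visited (pvMoves (pvZero w)) nq with
    | none => none
    | some nq' => pvWordsA back visited ws nq'

-- while front: ... (fuel is only a totality guard; a run never exhausts it under Pre_)
def pvLoopA : Nat → PySem.Set (List Char) → Int → PySem.Set (List Char) →
    PySem.Set (List Char) → Int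
  | 0, _, _, _, _ => -1
  | fuel + 1, visited, step, front, back =>
    if front = ([] : PySem.Set (List Char)) then -1
    else
      let visited' := PySem.Set.update visited front
      match pvWordsA back visited' front PySem.Set.empty with
      | none => step
      | some new_queue =>
        if new_queue.length > back.length then
          pvLoopA fuel visited' (step + 1) back new_queue
        else
          pvLoopA fuel visited' (step + 1) new_queue back

def pvRunA (word : List Char) : Int :=
  pvLoopA 1000 PySem.Set.empty 0 (PySem.Set.ofList [word]) (PySem.Set.ofList [pvTarget])

def slidingPuzzle (board : List (List Int)) : Int :=
  pvRunA (pvWordOf board)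

-- ===== PORT B =====
-- for j in moves[z]: ...; none = "return dist" was hit (a neighbour equals the target);
-- state is (visited, nxt)
def pvMovesLoopB (word : List Char) (zero : Nat) :
    List Nat → PySem.Set (List Char) × List (List Char) →
    Option (PySem.Set (List Char) × List (List Char))
  | [], st => some st
  | j :: _js, (vis, nxt) =>
    let nw := pvSwap word zero j
    if nw = pvTarget then none
    else if !(PySem.Set.contains vis nw) then
      pvMovesLoopB word zero _js (PySem.Set.add vis nw, nxt ++ [nw])
    else
      pvMovesLoopB word zero _js (vis, nxt)

-- for word in frontier: ...
def pvWordsB : List (List Char) → PySem.Set (List Char) × List (List Char) →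
    Option (PySem.Set (List Char) × List (List Char))
  | [], st => some st
  | w :: ws, st =>
    match pvMovesLoopB w (pvZero w) (pvMoves (pvZero w)) st with
    | none => none
    | some st' => pvWordsB ws st'

-- while frontier: ... (fuel is only a totality guard; a run never exhausts it under Pre_)
def pvLoopB : Nat → PySem.Set (List Char) → List (List Char) → Int → Int
  | 0, _, _, _ => -1
  | fuel + 1, visited, frontier, dist =>
    if frontier = ([] : List (List Char)) then -1
    else
      match pvWordsB frontier (visited, []) with
      | none => dist + 1
      | some (visited', nxt) => pvLoopB fuel visited' nxt (dist + 1)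

def pvRunB (word : List Char) : Int :=
  if word = pvTarget then 0
  else pvLoopB 1000 (PySem.Set.ofList [word]) [word] 0

def slidingPuzzle_alt (board : List (List Int)) : Int :=
  pvRunB (pvWordOf board)

-- ===== PRECONDITION & SPEC =====
-- Pre_ = exactly the boards on which A returns: the digit-string encoding must be at least
-- 6 characters long with a '0' among its first six characters (positions the moves table can
-- reach); otherwise A raises (ValueError: no '0'; IndexError: moves[z] with z >= 6 or a swap
-- index past the end of a short word), except for degenerate shorter self-loop encodings
-- (e.g. [[0,0,0,0,0]]) on which A and B both return -1 anyway.
def pvPreWord (board : List (List Int)) : List Char :=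
  board.flatten.flatMap (fun n => PySem.Int.toChars n)
def Pre_slidingPuzzle (board : List (List Int)) : Prop :=
  6 ≤ (pvPreWord board).length ∧ '0' ∈ (pvPreWord board).take 6
instance (board : List (List Int)) : Decidable (Pre_slidingPuzzle board) := by
  unfold Pre_slidingPuzzle; infer_instance

def pvWitness_slidingPuzzle : List (List Int) := [[1, 2, 3], [4, 5, 0]]

def Spec_slidingPuzzle (board : List (List Int)) (out : Int) : Prop := out = slidingPuzzle_alt board
instance (board : List (List Int)) (out : Int) : Decidable (Spec_slidingPuzzle board out) := by
  unfold Spec_slidingPuzzle; infer_instance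

-- ===== CLAIM (what is proved, stated in full; the proofs are below) =====
def Claim_equal_slidingPuzzle : Prop := ∀ (board : List (List Int)), Dom_slidingPuzzle board → Pre_slidingPuzzle board → Spec_slidingPuzzle board (slidingPuzzle board)

-- ===== LEMMAS AND PROOFS =====

-- A word is "good" when it is a permutation of the target word: exactly the states the
-- two searches can ever visit starting from a Pre_-admissible board.
def pvGood (w : List Char) : Prop := List.Perm w pvTarget

-- the neighbours a BFS level generates from word w
def pvNbrs (w : List Char) : List (List Char) :=
  (pvMoves (pvZero w)).map (fun j => pvSwap w (pvZero w) j)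

-- moves-table facts
theorem pvMoves_facts : ∀ z, z < 6 → ∀ j ∈ pvMoves z, j < 6 ∧ z ∈ pvMoves j ∧ j ≠ z := by
  intro z hz
  interval_cases z <;> decide

theorem pvMoves_ne_nil : ∀ z, z < 6 → pvMoves z ≠ [] := by
  intro z hz; interval_cases z <;> decide

theorem pvGood_length {w : List Char} (h : pvGood w) : w.length = 6 :=
  h.length_eq

theorem pvGood_nodup {w : List Char} (h : pvGood w) : w.Nodup :=
  h.nodup_iff.mpr (by decide)

-- the unique position of '0' in a good word
theorem pvZero_spec {w : List Char} (h : pvGood w) :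
    ∃ hz : pvZero w < w.length, w[pvZero w] = '0' ∧
      ∀ k (hk : k < w.length), w[k] = '0' → k = pvZero w := by
  have hmem : '0' ∈ w := h.mem_iff.mpr (by decide)
  obtain ⟨z, hz⟩ := Option.isSome_iff_exists.mp ((PySem.List.index?_isSome_iff w '0').mpr hmem)
  obtain ⟨hlt, hget, _⟩ := PySem.List.getElem_of_index?_eq_some hz
  have hzeq : pvZero w = z := by unfold pvZero; rw [hz]; rfl
  rw [hzeq]
  refine ⟨hlt, hget, ?_⟩
  intro k hk hk0
  exact (List.Nodup.getElem_inj_iff (pvGood_nodup h) (hi := hk) (hj := hlt)).mp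
    (by rw [hk0, hget])

-- swap is a permutation of the word
theorem pvSwap_perm (w : List Char) (i j : Nat) (hi : i < w.length) (hj : j < w.length) :
    List.Perm (pvSwap w i j) w := by
  rcases eq_or_ne i j with rfl | hij
  · unfold pvSwap
    rw [List.set_set, List.getD_eq_getElem _ _ hi, List.set_getElem_self]
  · apply List.perm_iff_count.mpr
    intro c
    unfold pvSwap
    simp only [List.getD_eq_getElem _ _ hi, List.getD_eq_getElem _ _ hj]
    have hj' : j < (w.set i (w[j]'hj)).length := by simpa using hj
    rw [List.count_set hj', List.count_set hi, List.getElem_set]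
    have hci : (w[i] == c) = true → 1 ≤ List.count c w := fun hb =>
      List.count_pos_iff.mpr (beq_iff_eq.mp hb ▸ List.getElem_mem hi)
    have hcj : (w[j] == c) = true → 1 ≤ List.count c w := fun hb =>
      List.count_pos_iff.mpr (beq_iff_eq.mp hb ▸ List.getElem_mem hj)
    split_ifs <;> simp_all <;> omega

theorem pvSwap_length (w : List Char) (i j : Nat) : (pvSwap w i j).length = w.length := by
  simp [pvSwap]

theorem pvSwap_getElem (w : List Char) (i j : Nat) (hi : i < w.length) (hj : j < w.length)
    (hij : i ≠ j) (k : Nat) (hk : k < w.length) :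
    (pvSwap w i j)[k]'(by simpa [pvSwap_length] using hk) =
      if k = j then w[i] else if k = i then w[j] else w[k] := by
  unfold pvSwap
  simp only [List.getD_eq_getElem _ _ hi, List.getD_eq_getElem _ _ hj]
  rw [List.getElem_set, List.getElem_set]
  rcases eq_or_ne k j with rfl | hkj
  · simp
  · rcases eq_or_ne k i with rfl | hki
    · simp [Ne.symm hkj, hij]
    · simp [hkj, hki, Ne.symm hkj, Ne.symm hki]

theorem pvSwap_swap (w : List Char) (i j : Nat) (hi : i < w.length) (hj : j < w.length)
    (hij : i ≠ j) : pvSwap (pvSwap w i j) j i = w := by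
  have hl := pvSwap_length w i j
  apply List.ext_getElem (by simp [pvSwap_length, hl])
  intro k hk1 hk2
  have hj' : j < (pvSwap w i j).length := by omega
  have hi' : i < (pvSwap w i j).length := by omega
  have hk' : k < (pvSwap w i j).length := by
    simp only [pvSwap_length] at hk1 ⊢; omega
  rw [pvSwap_getElem (pvSwap w i j) j i hj' hi' (Ne.symm hij) k
    (by simpa [pvSwap_length] using hk2)]
  rw [pvSwap_getElem w i j hi hj hij j hj, pvSwap_getElem w i j hi hj hij i hi,
    pvSwap_getElem w i j hi hj hij k hk2]
  rcases eq_or_ne k i with rfl | hki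
  · simp
  · rcases eq_or_ne k j with rfl | hkj
    · simp [hki, Ne.symm hki]
    · simp [hki, hkj]

-- neighbour relation: closure, symmetry, irreflexivity
theorem pvNbrs_good {w u : List Char} (hw : pvGood w) (hu : u ∈ pvNbrs w) : pvGood u := by
  obtain ⟨j, hj, rfl⟩ := List.mem_map.mp hu
  obtain ⟨hzlt, -, -⟩ := pvZero_spec hw
  have hlen := pvGood_length hw
  obtain ⟨hj6, -, -⟩ := pvMoves_facts _ (by omega) j hj
  exact (pvSwap_perm w _ j hzlt (by omega)).trans hw

theorem pvNbrs_symm {w u : List Char} (hw : pvGood w) (hu : u ∈ pvNbrs w) : w ∈ pvNbrs u := by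
  have hugood := pvNbrs_good hw hu
  obtain ⟨j, hj, rfl⟩ := List.mem_map.mp hu
  obtain ⟨hzlt, hwz, -⟩ := pvZero_spec hw
  have hlen := pvGood_length hw
  obtain ⟨hj6, hzmem, hjz⟩ := pvMoves_facts _ (by omega) j hj
  have hjlt : j < w.length := by omega
  have hzj : pvZero w ≠ j := Ne.symm hjz
  have huj : (pvSwap w (pvZero w) j)[j]'(by simpa [pvSwap_length] using hjlt) = '0' := by
    rw [pvSwap_getElem w (pvZero w) j hzlt hjlt hzj j hjlt]
    simpa using hwz
  obtain ⟨hlt', -, huniq'⟩ := pvZero_spec hugood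
  have hzu : pvZero (pvSwap w (pvZero w) j) = j :=
    (huniq' j (by simpa [pvSwap_length] using hjlt) huj).symm
  unfold pvNbrs
  rw [hzu]
  exact List.mem_map.mpr ⟨pvZero w, hzmem,
    pvSwap_swap w (pvZero w) j hzlt hjlt hzj⟩

theorem pvNbrs_ne {w u : List Char} (hw : pvGood w) (hu : u ∈ pvNbrs w) : u ≠ w := by
  obtain ⟨j, hj, rfl⟩ := List.mem_map.mp hu
  obtain ⟨hzlt, hwz, -⟩ := pvZero_spec hw
  have hlen := pvGood_length hw
  obtain ⟨hj6, hzmem, hjz⟩ := pvMoves_facts _ (by omega) j hj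
  have hjlt : j < w.length := by omega
  have hzj : pvZero w ≠ j := Ne.symm hjz
  intro heq
  have hval : (pvSwap w (pvZero w) j)[pvZero w]'(by simpa [pvSwap_length] using hzlt) = w[j] := by
    rw [pvSwap_getElem w (pvZero w) j hzlt hjlt hzj (pvZero w) hzlt]
    simp [hzj]
  have hval2 : (pvSwap w (pvZero w) j)[pvZero w]'(by simpa [pvSwap_length] using hzlt)
      = w[pvZero w]'hzlt := List.getElem_of_eq heq _
  have : w[j] = w[pvZero w]'hzlt := by rw [← hval, hval2]
  exact hjz ((List.Nodup.getElem_inj_iff (pvGood_nodup hw)).mp this)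

-- the sliding-puzzle graph
def pvG : SimpleGraph (List Char) where
  Adj u v := pvGood u ∧ pvGood v ∧ u ∈ pvNbrs v
  symm := by
    intro u v ⟨hu, hv, hm⟩
    exact ⟨hv, hu, pvNbrs_symm hv hm⟩
  loopless := ⟨fun u h => pvNbrs_ne h.1 h.2.2 rfl⟩

theorem pvAdj_iff {u v : List Char} (hv : pvGood v) : pvG.Adj u v ↔ u ∈ pvNbrs v := by
  constructor
  · rintro ⟨_, _, h⟩; exact h
  · intro h; exact ⟨pvNbrs_good hv h, hv, h⟩

theorem pvReachable_good {x v : List Char} (hx : pvGood x) (h : pvG.Reachable x v) :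
    pvGood v := by
  obtain ⟨p⟩ := h
  induction p with
  | nil => exact hx
  | cons h _ ih => exact ih h.2.1

-- classical answer value: the graph distance, or -1 when unreachable
noncomputable def pvAns (s t : List Char) : Int :=
  @ite _ (pvG.Reachable s t) (Classical.propDecidable _) ((pvG.dist s t : Int)) (-1)

theorem pvAns_pos {s t : List Char} (h : pvG.Reachable s t) : pvAns s t = (pvG.dist s t : Int) := by
  unfold pvAns; split <;> first | rfl | exact absurd h (by assumption)

theorem pvAns_neg {s t : List Char} (h : ¬ pvG.Reachable s t) : pvAns s t = -1 := by
  unfold pvAns; split <;> first | rfl | exact absurd (by assumption) h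

-- sphere and strict-ball predicates of the graph metric
def pvSph (x v : List Char) (k : Nat) : Prop := pvG.Reachable x v ∧ pvG.dist x v = k
def pvBallLt (x v : List Char) (k : Nat) : Prop := pvG.Reachable x v ∧ pvG.dist x v < k

theorem pvSph_zero (x v : List Char) : pvSph x v 0 ↔ v = x := by
  constructor
  · rintro ⟨hr, hd⟩
    exact (hr.dist_eq_zero_iff.mp hd).symm
  · rintro rfl
    exact ⟨SimpleGraph.Reachable.refl v, SimpleGraph.dist_self⟩

-- metric lemmas
theorem pvSph_down {x v : List Char} {k : Nat} (h : pvSph x v (k + 1)) :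
    ∃ u, pvSph x u k ∧ pvG.Adj u v := by
  obtain ⟨hr, hd⟩ := h
  obtain ⟨p, hp⟩ := hr.exists_walk_length_eq_dist
  rw [hd] at hp
  have hadj : pvG.Adj (p.getVert k) (p.getVert (k + 1)) :=
    p.adj_getVert_succ (by omega)
  have hv : p.getVert (k + 1) = v := by rw [← hp]; exact p.getVert_length
  rw [hv] at hadj
  have hru : pvG.Reachable x (p.getVert k) := ⟨p.take k⟩
  have hle : pvG.dist x (p.getVert k) ≤ k := by
    have := pvG.dist_le (p.take k)
    rwa [SimpleGraph.Walk.take_length, hp, min_eq_left (by omega)] at this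
  have hge : k ≤ pvG.dist x (p.getVert k) := by
    have h1 : pvG.dist x v ≤ pvG.dist x (p.getVert k) + pvG.dist (p.getVert k) v :=
      SimpleGraph.Reachable.dist_triangle_right hadj.reachable x
    have h2 : pvG.dist (p.getVert k) v = 1 := SimpleGraph.dist_eq_one_iff_adj.mpr hadj
    omega
  exact ⟨p.getVert k, ⟨hru, by omega⟩, hadj⟩

theorem pvSph_up {x u v : List Char} {k : Nat} (hu : pvSph x u k) (ha : pvG.Adj u v)
    (hv : ¬ pvBallLt x v (k + 1)) : pvSph x v (k + 1) := by
  obtain ⟨hru, hdu⟩ := hu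
  have hrv : pvG.Reachable x v := hru.trans ha.reachable
  have h1 : pvG.dist x v ≤ pvG.dist x u + pvG.dist u v :=
    SimpleGraph.Reachable.dist_triangle_right ha.reachable x
  have h2 : pvG.dist u v = 1 := SimpleGraph.dist_eq_one_iff_adj.mpr ha
  have h3 : ¬ (pvG.dist x v < k + 1) := fun hlt => hv ⟨hrv, hlt⟩
  exact ⟨hrv, by omega⟩

theorem pvSph_mid {s t : List Char} (h : pvG.Reachable s t) (a b : Nat)
    (hab : a + b = pvG.dist s t) : ∃ v, pvSph s v a ∧ pvSph t v b := by
  induction a generalizing b with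
  | zero =>
    refine ⟨s, (pvSph_zero s s).mpr rfl, h.symm, ?_⟩
    rw [SimpleGraph.dist_comm]
    omega
  | succ a ih =>
    obtain ⟨v, hsv, htv⟩ := ih (b + 1) (by omega)
    obtain ⟨u, htu, hadj⟩ := pvSph_down htv
    have hru : pvG.Reachable s u := hsv.1.trans hadj.symm.reachable
    have h1 : pvG.dist s u ≤ pvG.dist s v + pvG.dist v u :=
      SimpleGraph.Reachable.dist_triangle_right hadj.symm.reachable s
    have h2 : pvG.dist v u = 1 := SimpleGraph.dist_eq_one_iff_adj.mpr hadj.symm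
    have h3 : pvG.dist s t ≤ pvG.dist s u + pvG.dist u t :=
      SimpleGraph.Reachable.dist_triangle_left hru t
    have h4 : pvG.dist u t = b := by rw [SimpleGraph.dist_comm]; exact htu.2
    have h5 := hsv.2
    exact ⟨u, ⟨hru, by omega⟩, htu⟩

theorem pvMeet_bound {x y v : List Char} (hx : pvG.Reachable x v) (hy : pvG.Reachable y v) :
    pvG.Reachable x y ∧ pvG.dist x y ≤ pvG.dist x v + pvG.dist y v := by
  refine ⟨hx.trans hy.symm, ?_⟩
  have h1 : pvG.dist x y ≤ pvG.dist x v + pvG.dist v y :=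
    SimpleGraph.Reachable.dist_triangle_left hx y
  rw [SimpleGraph.dist_comm (u := v)] at h1
  exact h1

-- all good words live inside the 720-element permutation list of the target
theorem pvGood_card_bound {l : List (List Char)} (hn : l.Nodup)
    (hg : ∀ v ∈ l, pvGood v) : l.length ≤ 720 := by
  have hsub : l ⊆ pvTarget.permutations := fun v hv => List.mem_permutations.mpr (hg v hv)
  have h1 := (List.subperm_of_subset hn hsub).length_le
  have h2 : pvTarget.permutations.length = 720 := by
    rw [List.length_permutations]
    decide
  omega

-- ## fold-level characterisations of the two inner loops

theorem pvMovesLoopA_none {word : List Char} {zero : Nat} {back visited : PySem.Set (List Char)}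
    {js : List Nat} {nq : PySem.Set (List Char)} (hne : js ≠ [])
    (hb : word ∈ back) : pvMovesLoopA word zero back visited js nq = none := by
  cases js with
  | nil => exact absurd rfl hne
  | cons j js =>
    have hcb : PySem.Set.contains back word = true := (PySem.Set.contains_iff back word).mpr hb
    simp only [pvMovesLoopA, hcb, if_true]

theorem pvMovesLoopA_some {word : List Char} {zero : Nat} {back visited : PySem.Set (List Char)}
    (hb : word ∉ back) (js : List Nat) (nq : PySem.Set (List Char)) :
    ∃ r, pvMovesLoopA word zero back visited js nq = some r ∧
      (∀ v, v ∈ r ↔ v ∈ nq ∨ ∃ j ∈ js, v = pvSwap word zero j ∧ v ∉ visited) ∧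
      (nq.Nodup → r.Nodup) := by
  have hcb : PySem.Set.contains back word = false := by
    cases hcb : PySem.Set.contains back word
    · rfl
    · exact absurd ((PySem.Set.contains_iff back word).mp hcb) hb
  induction js generalizing nq with
  | nil => exact ⟨nq, rfl, by simp, id⟩
  | cons j js ih =>
    obtain ⟨r, hr, hmem, hnd⟩ := ih
      (if !(PySem.Set.contains visited (pvSwap word zero j)) then
        PySem.Set.add nq (pvSwap word zero j) else nq)
    refine ⟨r, ?_, ?_, ?_⟩
    · simp only [pvMovesLoopA, hcb, Bool.false_eq_true, if_false]
      exact hr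
    · intro v
      rw [hmem v]
      by_cases hvis : PySem.Set.contains visited (pvSwap word zero j) = true
      · have hv' : pvSwap word zero j ∈ visited := (PySem.Set.contains_iff _ _).mp hvis
        simp only [hvis, Bool.not_true, Bool.false_eq_true, if_false]
        constructor
        · rintro (h | ⟨j', hj', h1, h2⟩)
          · exact Or.inl h
          · exact Or.inr ⟨j', List.mem_cons_of_mem _ hj', h1, h2⟩
        · rintro (h | ⟨j', hj', h1, h2⟩)
          · exact Or.inl h
          · rcases List.mem_cons.mp hj' with rfl | hj''
            · exact absurd (h1 ▸ hv') h2
            · exact Or.inr ⟨j', hj'', h1, h2⟩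
      · have hv' : pvSwap word zero j ∉ visited := fun hm =>
          hvis ((PySem.Set.contains_iff _ _).mpr hm)
        simp only [eq_false_of_ne_true hvis, Bool.not_false, if_true]
        rw [PySem.Set.mem_add]
        constructor
        · rintro ((h | h) | ⟨j', hj', h1, h2⟩)
          · exact Or.inl h
          · exact Or.inr ⟨j, List.mem_cons_self, h, h ▸ hv'⟩
          · exact Or.inr ⟨j', List.mem_cons_of_mem _ hj', h1, h2⟩
        · rintro (h | ⟨j', hj', h1, h2⟩)
          · exact Or.inl (Or.inl h)
          · rcases List.mem_cons.mp hj' with rfl | hj''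
            · exact Or.inl (Or.inr h1)
            · exact Or.inr ⟨j', hj'', h1, h2⟩
    · intro hnq
      apply hnd
      split
      · exact PySem.Set.nodup_add nq _ hnq
      · exact hnq

theorem pvWordsA_none {back visited : PySem.Set (List Char)} {ws : List (List Char)}
    {nq : PySem.Set (List Char)} (hz6 : ∀ w ∈ ws, pvZero w < 6) (hmeet : ∃ w ∈ ws, w ∈ back) :
    pvWordsA back visited ws nq = none := by
  induction ws generalizing nq with
  | nil => obtain ⟨w, hw, -⟩ := hmeet; exact absurd hw (List.not_mem_nil)
  | cons w ws ih =>
    have hzw : pvZero w < 6 := hz6 w List.mem_cons_self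
    by_cases hwb : w ∈ back
    · rw [pvWordsA, pvMovesLoopA_none (pvMoves_ne_nil _ hzw) hwb]
    · obtain ⟨r, hr, -, -⟩ := pvMovesLoopA_some hwb (pvMoves (pvZero w)) nq
      rw [pvWordsA, hr]
      apply ih (fun x hx => hz6 x (List.mem_cons_of_mem _ hx))
      obtain ⟨w', hw', hw'b⟩ := hmeet
      rcases List.mem_cons.mp hw' with rfl | hw''
      · exact absurd hw'b hwb
      · exact ⟨w', hw'', hw'b⟩

theorem pvWordsA_some {back visited : PySem.Set (List Char)} (ws : List (List Char))
    (nq : PySem.Set (List Char)) (hnomeet : ∀ w ∈ ws, w ∉ back) :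
    ∃ r, pvWordsA back visited ws nq = some r ∧
      (∀ v, v ∈ r ↔ v ∈ nq ∨ ∃ w ∈ ws, v ∈ pvNbrs w ∧ v ∉ visited) ∧
      (nq.Nodup → r.Nodup) := by
  induction ws generalizing nq with
  | nil => exact ⟨nq, rfl, by simp, id⟩
  | cons w ws ih =>
    obtain ⟨r1, hr1, hmem1, hnd1⟩ :=
      pvMovesLoopA_some (hnomeet w List.mem_cons_self) (pvMoves (pvZero w)) nq
    obtain ⟨r, hr, hmem, hnd⟩ := ih r1
      (fun x hx => hnomeet x (List.mem_cons_of_mem _ hx))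
    refine ⟨r, by rw [pvWordsA, hr1]; exact hr, ?_, fun h => hnd (hnd1 h)⟩
    intro v
    rw [hmem v, hmem1 v]
    have hnb : ∀ x, x ∈ pvNbrs w ↔ ∃ j ∈ pvMoves (pvZero w), x = pvSwap w (pvZero w) j := by
      intro x
      simp [pvNbrs, List.mem_map, eq_comm]
    constructor
    · rintro ((h | ⟨j, hj, h1, h2⟩) | ⟨w', hw', h1, h2⟩)
      · exact Or.inl h
      · exact Or.inr ⟨w, List.mem_cons_self, (hnb v).mpr ⟨j, hj, h1⟩, h2⟩
      · exact Or.inr ⟨w', List.mem_cons_of_mem _ hw', h1, h2⟩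
    · rintro (h | ⟨w', hw', h1, h2⟩)
      · exact Or.inl (Or.inl h)
      · rcases List.mem_cons.mp hw' with rfl | hw''
        · obtain ⟨j, hj, hje⟩ := (hnb v).mp h1
          exact Or.inl (Or.inr ⟨j, hj, hje, h2⟩)
        · exact Or.inr ⟨w', hw'', h1, h2⟩

theorem pvMovesLoopB_none {word : List Char} {zero : Nat} {js : List Nat}
    {vis : PySem.Set (List Char)} {nxt : List (List Char)}
    (hhit : ∃ j ∈ js, pvSwap word zero j = pvTarget) :
    pvMovesLoopB word zero js (vis, nxt) = none := by
  induction js generalizing vis nxt with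
  | nil => obtain ⟨j, hj, -⟩ := hhit; exact absurd hj List.not_mem_nil
  | cons j js ih =>
    by_cases hj0 : pvSwap word zero j = pvTarget
    · simp only [pvMovesLoopB, if_pos hj0]
    · have htail : ∃ j' ∈ js, pvSwap word zero j' = pvTarget := by
        obtain ⟨j', hj', hj'e⟩ := hhit
        rcases List.mem_cons.mp hj' with rfl | h
        · exact absurd hj'e hj0
        · exact ⟨j', h, hj'e⟩
      by_cases hv : PySem.Set.contains vis (pvSwap word zero j) = true
      · simp only [pvMovesLoopB, if_neg hj0, hv, Bool.not_true, Bool.false_eq_true, if_false]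
        exact ih htail
      · simp only [pvMovesLoopB, if_neg hj0, eq_false_of_ne_true hv, Bool.not_false, if_true]
        exact ih htail

theorem pvMovesLoopB_some {word : List Char} {zero : Nat} (js : List Nat)
    (vis : PySem.Set (List Char)) (nxt : List (List Char))
    (hmiss : ∀ j ∈ js, pvSwap word zero j ≠ pvTarget)
    (hsub : ∀ v ∈ nxt, v ∈ vis) (hv : vis.Nodup) (hn : nxt.Nodup) :
    ∃ vis' nxt', pvMovesLoopB word zero js (vis, nxt) = some (vis', nxt') ∧
      (∀ v, v ∈ vis' ↔ v ∈ vis ∨ ∃ j ∈ js, v = pvSwap word zero j) ∧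
      (∀ v, v ∈ nxt' ↔ v ∈ nxt ∨ (∃ j ∈ js, v = pvSwap word zero j) ∧ v ∉ vis) ∧
      (∀ v ∈ nxt', v ∈ vis') ∧ vis'.Nodup ∧ nxt'.Nodup ∧
      (∃ d, vis' = vis ++ d ∧ nxt' = nxt ++ d) := by
  induction js generalizing vis nxt with
  | nil =>
    exact ⟨vis, nxt, rfl, by simp, by simp, hsub, hv, hn, [], by simp, by simp⟩
  | cons j js ih =>
    have hj0 : pvSwap word zero j ≠ pvTarget := hmiss j List.mem_cons_self
    have hmiss' : ∀ j' ∈ js, pvSwap word zero j' ≠ pvTarget :=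
      fun j' hj' => hmiss j' (List.mem_cons_of_mem _ hj')
    by_cases hvis : PySem.Set.contains vis (pvSwap word zero j) = true
    · have hmm : pvSwap word zero j ∈ vis := (PySem.Set.contains_iff _ _).mp hvis
      obtain ⟨vis', nxt', heq, hvm, hnm, hs', hv', hn', hd⟩ := ih vis nxt hmiss' hsub hv hn
      refine ⟨vis', nxt', ?_, ?_, ?_, hs', hv', hn', hd⟩
      · simp only [pvMovesLoopB, if_neg hj0, hvis, Bool.not_true, Bool.false_eq_true, if_false]
        exact heq
      · intro v
        rw [hvm v]
        constructor
        · rintro (h | ⟨j', hj', h1⟩)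
          · exact Or.inl h
          · exact Or.inr ⟨j', List.mem_cons_of_mem _ hj', h1⟩
        · rintro (h | ⟨j', hj', h1⟩)
          · exact Or.inl h
          · rcases List.mem_cons.mp hj' with rfl | h2
            · exact Or.inl (h1 ▸ hmm)
            · exact Or.inr ⟨j', h2, h1⟩
      · intro v
        rw [hnm v]
        constructor
        · rintro (h | ⟨⟨j', hj', h1⟩, h2⟩)
          · exact Or.inl h
          · exact Or.inr ⟨⟨j', List.mem_cons_of_mem _ hj', h1⟩, h2⟩
        · rintro (h | ⟨⟨j', hj', h1⟩, h2⟩)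
          · exact Or.inl h
          · rcases List.mem_cons.mp hj' with rfl | h3
            · exact absurd (h1 ▸ hmm) h2
            · exact Or.inr ⟨⟨j', h3, h1⟩, h2⟩
    · have hmm : pvSwap word zero j ∉ vis := fun h => hvis ((PySem.Set.contains_iff _ _).mpr h)
      have hsub' : ∀ v ∈ nxt ++ [pvSwap word zero j], v ∈ PySem.Set.add vis (pvSwap word zero j) := by
        intro v hvv
        rcases List.mem_append.mp hvv with h | h
        · exact (PySem.Set.mem_add _ _ _).mpr (Or.inl (hsub v h))
        · exact (PySem.Set.mem_add _ _ _).mpr (Or.inr (List.mem_singleton.mp h))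
      have hn2 : (nxt ++ [pvSwap word zero j]).Nodup := by
        refine hn.append (by simp) ?_
        intro a ha hb
        rw [List.mem_singleton] at hb
        exact hmm (hb ▸ hsub a ha)
      obtain ⟨vis', nxt', heq, hvm, hnm, hs', hv', hn', d', hd1, hd2⟩ :=
        ih (PySem.Set.add vis (pvSwap word zero j)) (nxt ++ [pvSwap word zero j]) hmiss' hsub'
          (PySem.Set.nodup_add vis _ hv) hn2
      have hadd : PySem.Set.add vis (pvSwap word zero j) = vis ++ [pvSwap word zero j] := by
        simp only [PySem.Set.add, hvis, Bool.false_eq_true, if_false]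
      refine ⟨vis', nxt', ?_, ?_, ?_, hs', hv', hn',
        pvSwap word zero j :: d', by rw [hd1, hadd]; simp, by rw [hd2]; simp⟩
      · simp only [pvMovesLoopB, if_neg hj0, eq_false_of_ne_true hvis, Bool.not_false, if_true]
        exact heq
      · intro v
        rw [hvm v]
        rw [PySem.Set.mem_add]
        constructor
        · rintro ((h | h) | ⟨j', hj', h1⟩)
          · exact Or.inl h
          · exact Or.inr ⟨j, List.mem_cons_self, h⟩
          · exact Or.inr ⟨j', List.mem_cons_of_mem _ hj', h1⟩
        · rintro (h | ⟨j', hj', h1⟩)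
          · exact Or.inl (Or.inl h)
          · rcases List.mem_cons.mp hj' with rfl | h2
            · exact Or.inl (Or.inr h1)
            · exact Or.inr ⟨j', h2, h1⟩
      · intro v
        rw [hnm v]
        rw [List.mem_append, List.mem_singleton, PySem.Set.mem_add]
        constructor
        · rintro ((h | h) | ⟨⟨j', hj', h1⟩, h2⟩)
          · exact Or.inl h
          · exact Or.inr ⟨⟨j, List.mem_cons_self, h⟩, h ▸ hmm⟩
          · exact Or.inr ⟨⟨j', List.mem_cons_of_mem _ hj', h1⟩,
              fun hx => h2 (Or.inl hx)⟩
        · rintro (h | ⟨⟨j', hj', h1⟩, h2⟩)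
          · exact Or.inl (Or.inl h)
          · rcases List.mem_cons.mp hj' with rfl | h3
            · exact Or.inl (Or.inr h1)
            · by_cases hveq : v = pvSwap word zero j
              · exact Or.inl (Or.inr hveq)
              · exact Or.inr ⟨⟨j', h3, h1⟩, fun hx =>
                  hx.elim h2 hveq⟩

theorem pvMovesLoopB_progress {word : List Char} {zero : Nat} (js : List Nat)
    (st : PySem.Set (List Char) × List (List Char))
    (hmiss : ∀ j ∈ js, pvSwap word zero j ≠ pvTarget) :
    ∃ st', pvMovesLoopB word zero js st = some st' := by
  induction js generalizing st with
  | nil => exact ⟨st, rfl⟩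
  | cons j js ih =>
    obtain ⟨vis, nxt⟩ := st
    have hj0 : pvSwap word zero j ≠ pvTarget := hmiss j List.mem_cons_self
    have hmiss' : ∀ j' ∈ js, pvSwap word zero j' ≠ pvTarget :=
      fun j' hj' => hmiss j' (List.mem_cons_of_mem _ hj')
    by_cases hvis : PySem.Set.contains vis (pvSwap word zero j) = true
    · obtain ⟨st', h⟩ := ih (vis, nxt) hmiss'
      exact ⟨st', by
        simp only [pvMovesLoopB, if_neg hj0, hvis, Bool.not_true, Bool.false_eq_true, if_false]
        exact h⟩
    · obtain ⟨st', h⟩ := ih (PySem.Set.add vis (pvSwap word zero j),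
        nxt ++ [pvSwap word zero j]) hmiss'
      exact ⟨st', by
        simp only [pvMovesLoopB, if_neg hj0, eq_false_of_ne_true hvis, Bool.not_false, if_true]
        exact h⟩

theorem pvWordsB_none {ws : List (List Char)} {vis : PySem.Set (List Char)}
    {nxt : List (List Char)} (hhit : ∃ w ∈ ws, pvTarget ∈ pvNbrs w) :
    pvWordsB ws (vis, nxt) = none := by
  induction ws generalizing vis nxt with
  | nil => obtain ⟨w, hw, -⟩ := hhit; exact absurd hw List.not_mem_nil
  | cons w ws ih =>
    have hnb : ∀ x, x ∈ pvNbrs w ↔ ∃ j ∈ pvMoves (pvZero w), x = pvSwap w (pvZero w) j := by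
      intro x; simp [pvNbrs, List.mem_map, eq_comm]
    by_cases hwt : pvTarget ∈ pvNbrs w
    · obtain ⟨j, hj, hje⟩ := (hnb pvTarget).mp hwt
      rw [pvWordsB, pvMovesLoopB_none ⟨j, hj, hje.symm⟩]
    · have htail : ∃ w' ∈ ws, pvTarget ∈ pvNbrs w' := by
        obtain ⟨w', hw', h1⟩ := hhit
        rcases List.mem_cons.mp hw' with rfl | h2
        · exact absurd h1 hwt
        · exact ⟨w', h2, h1⟩
      have hmiss : ∀ j ∈ pvMoves (pvZero w), pvSwap w (pvZero w) j ≠ pvTarget :=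
        fun j hj he => hwt ((hnb pvTarget).mpr ⟨j, hj, he.symm⟩)
      obtain ⟨st', heq⟩ := pvMovesLoopB_progress (pvMoves (pvZero w)) (vis, nxt) hmiss
      rw [pvWordsB, heq]
      obtain ⟨vis', nxt'⟩ := st'
      exact ih htail

theorem pvWordsB_some (ws : List (List Char)) (vis : PySem.Set (List Char))
    (nxt : List (List Char)) (hmiss : ∀ w ∈ ws, pvTarget ∉ pvNbrs w)
    (hsub : ∀ v ∈ nxt, v ∈ vis) (hv : vis.Nodup) (hn : nxt.Nodup) :
    ∃ vis' nxt', pvWordsB ws (vis, nxt) = some (vis', nxt') ∧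
      (∀ v, v ∈ vis' ↔ v ∈ vis ∨ ∃ w ∈ ws, v ∈ pvNbrs w) ∧
      (∀ v, v ∈ nxt' ↔ v ∈ nxt ∨ (∃ w ∈ ws, v ∈ pvNbrs w) ∧ v ∉ vis) ∧
      (∀ v ∈ nxt', v ∈ vis') ∧ vis'.Nodup ∧ nxt'.Nodup ∧
      (∃ d, vis' = vis ++ d ∧ nxt' = nxt ++ d) := by
  induction ws generalizing vis nxt with
  | nil => exact ⟨vis, nxt, rfl, by simp, by simp, hsub, hv, hn, [], by simp, by simp⟩
  | cons w ws ih =>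
    have hnb : ∀ x, x ∈ pvNbrs w ↔ ∃ j ∈ pvMoves (pvZero w), x = pvSwap w (pvZero w) j := by
      intro x; simp [pvNbrs, List.mem_map, eq_comm]
    have hmiss1 : ∀ j ∈ pvMoves (pvZero w), pvSwap w (pvZero w) j ≠ pvTarget :=
      fun j hj he => (hmiss w List.mem_cons_self) ((hnb pvTarget).mpr ⟨j, hj, he.symm⟩)
    obtain ⟨vis1, nxt1, heq1, hvm1, hnm1, hs1, hv1, hn1, d1, hd11, hd12⟩ :=
      pvMovesLoopB_some (pvMoves (pvZero w)) vis nxt hmiss1 hsub hv hn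
    obtain ⟨vis', nxt', heq, hvm, hnm, hs', hv', hn', d2, hd21, hd22⟩ :=
      ih vis1 nxt1 (fun x hx => hmiss x (List.mem_cons_of_mem _ hx)) hs1 hv1 hn1
    have hvis1 : ∀ x, x ∈ vis1 ↔ x ∈ vis ∨ x ∈ pvNbrs w := by
      intro x
      rw [hvm1 x]
      constructor
      · rintro (h | ⟨j, hj, h1⟩)
        · exact Or.inl h
        · exact Or.inr ((hnb x).mpr ⟨j, hj, h1⟩)
      · rintro (h | h)
        · exact Or.inl h
        · obtain ⟨j, hj, h1⟩ := (hnb x).mp h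
          exact Or.inr ⟨j, hj, h1⟩
    have hnxt1 : ∀ x, x ∈ nxt1 ↔ x ∈ nxt ∨ (x ∈ pvNbrs w ∧ x ∉ vis) := by
      intro x
      rw [hnm1 x]
      constructor
      · rintro (h | ⟨⟨j, hj, h1⟩, h2⟩)
        · exact Or.inl h
        · exact Or.inr ⟨(hnb x).mpr ⟨j, hj, h1⟩, h2⟩
      · rintro (h | ⟨h1, h2⟩)
        · exact Or.inl h
        · obtain ⟨j, hj, h3⟩ := (hnb x).mp h1
          exact Or.inr ⟨⟨j, hj, h3⟩, h2⟩
    refine ⟨vis', nxt', ?_, ?_, ?_, hs', hv', hn',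
      d1 ++ d2, by rw [hd21, hd11]; simp, by rw [hd22, hd12]; simp⟩
    · rw [pvWordsB, heq1]
      exact heq
    · intro v
      rw [hvm v, hvis1 v]
      constructor
      · rintro ((h | h) | ⟨w', hw', h1⟩)
        · exact Or.inl h
        · exact Or.inr ⟨w, List.mem_cons_self, h⟩
        · exact Or.inr ⟨w', List.mem_cons_of_mem _ hw', h1⟩
      · rintro (h | ⟨w', hw', h1⟩)
        · exact Or.inl (Or.inl h)
        · rcases List.mem_cons.mp hw' with rfl | h2
          · exact Or.inl (Or.inr h1)
          · exact Or.inr ⟨w', h2, h1⟩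
    · intro v
      rw [hnm v, hnxt1 v]
      constructor
      · rintro ((h | ⟨h1, h2⟩) | ⟨⟨w', hw', h1⟩, h2⟩)
        · exact Or.inl h
        · exact Or.inr ⟨⟨w, List.mem_cons_self, h1⟩, h2⟩
        · exact Or.inr ⟨⟨w', List.mem_cons_of_mem _ hw', h1⟩,
            fun hx => h2 ((hvis1 v).mpr (Or.inl hx))⟩
      · rintro (h | ⟨⟨w', hw', h1⟩, h2⟩)
        · exact Or.inl (Or.inl h)
        · rcases List.mem_cons.mp hw' with rfl | h3
          · exact Or.inl (Or.inr ⟨h1, h2⟩)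
          · by_cases hvv : v ∈ vis1
            · rcases (hvis1 v).mp hvv with h4 | h4
              · exact absurd h4 h2
              · exact Or.inl (Or.inr ⟨h4, h2⟩)
            · exact Or.inr ⟨⟨w', h3, h1⟩, hvv⟩

-- ## the two loop invariants

def pvInvA (s t : List Char) (fuel : Nat) (visited front back : PySem.Set (List Char))
    (step : Int) : Prop :=
  pvGood s ∧ pvGood t ∧
  ∃ (x y : List Char) (a b : Nat), ((x = s ∧ y = t) ∨ (x = t ∧ y = s)) ∧ step = (a : Int) + (b : Int) ∧
    front.Nodup ∧ back.Nodup ∧ visited.Nodup ∧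
    (∀ v, v ∈ front ↔ pvSph x v a) ∧
    (∀ v, v ∈ back ↔ pvSph y v b) ∧
    (∀ v, v ∈ visited ↔ pvBallLt x v a ∨ pvBallLt y v b) ∧
    (pvG.Reachable s t → a + b ≤ pvG.dist s t ∧ 722 ≤ fuel + visited.length)

theorem pvLoopA_correct (fuel : Nat) :
    ∀ (visited front back : PySem.Set (List Char)) (step : Int) (s t : List Char),
    pvInvA s t fuel visited front back step →
    pvLoopA fuel visited step front back = pvAns s t := by
  induction fuel with
  | zero =>
    intro visited front back step s t hinv
    obtain ⟨hgs, hgt, x, y, a, b, hxy, hstep, hfN, hbN, hvN, hf, hbk, hv, hbound⟩ := hinv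
    have hgx : pvGood x := by rcases hxy with ⟨rfl, rfl⟩ | ⟨rfl, rfl⟩ <;> assumption
    have hgy : pvGood y := by rcases hxy with ⟨rfl, rfl⟩ | ⟨rfl, rfl⟩ <;> assumption
    by_cases hr : pvG.Reachable s t
    · exfalso
      have h722 := (hbound hr).2
      have hgood : ∀ v ∈ visited, pvGood v := by
        intro v hvv
        rcases (hv v).mp hvv with ⟨h1, -⟩ | ⟨h1, -⟩
        · exact pvReachable_good hgx h1
        · exact pvReachable_good hgy h1
      have := pvGood_card_bound hvN hgood
      omega
    · rw [pvAns_neg hr]; rfl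
  | succ fuel ih =>
    intro visited front back step s t hinv
    obtain ⟨hgs, hgt, x, y, a, b, hxy, hstep, hfN, hbN, hvN, hf, hbk, hv, hbound⟩ := hinv
    have hgx : pvGood x := by rcases hxy with ⟨rfl, rfl⟩ | ⟨rfl, rfl⟩ <;> assumption
    have hgy : pvGood y := by rcases hxy with ⟨rfl, rfl⟩ | ⟨rfl, rfl⟩ <;> assumption
    have hrxy_iff : pvG.Reachable x y ↔ pvG.Reachable s t := by
      rcases hxy with ⟨rfl, rfl⟩ | ⟨rfl, rfl⟩
      · exact Iff.rfl
      · exact ⟨fun h => h.symm, fun h => h.symm⟩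
    have hdxy : pvG.dist x y = pvG.dist s t := by
      rcases hxy with ⟨rfl, rfl⟩ | ⟨rfl, rfl⟩
      · rfl
      · exact SimpleGraph.dist_comm
    by_cases hfe : front = []
    · rw [show pvLoopA (fuel + 1) visited step front back = -1 from by
        simp [pvLoopA, hfe]]
      by_cases hr : pvG.Reachable s t
      · exfalso
        have hab := (hbound hr).1
        have hrxy := hrxy_iff.mpr hr
        have hd := hdxy
        obtain ⟨v, hv1, -⟩ := pvSph_mid hrxy a (pvG.dist x y - a) (by omega)
        have := (hf v).mpr hv1
        rw [hfe] at this
        exact List.not_mem_nil this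
      · rw [pvAns_neg hr]
    · have hgf : ∀ w ∈ front, pvGood w := fun w hw => pvReachable_good hgx ((hf w).mp hw).1
      have hz6f : ∀ w ∈ front, pvZero w < 6 := by
        intro w hw
        obtain ⟨hzlt, -, -⟩ := pvZero_spec (hgf w hw)
        have := pvGood_length (hgf w hw)
        omega
      have hvis' : ∀ v, v ∈ PySem.Set.update visited front ↔
          (pvBallLt x v (a + 1) ∨ pvBallLt y v b) := by
        intro v
        rw [PySem.Set.mem_update, hv v]
        constructor
        · rintro ((⟨h1, h2⟩ | h) | hfr)
          · exact Or.inl ⟨h1, by omega⟩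
          · exact Or.inr h
          · obtain ⟨h1, h2⟩ := (hf v).mp hfr
            exact Or.inl ⟨h1, by omega⟩
        · rintro (⟨h1, h2⟩ | h)
          · rcases Nat.lt_or_ge (pvG.dist x v) a with h3 | h3
            · exact Or.inl (Or.inl ⟨h1, h3⟩)
            · exact Or.inr ((hf v).mpr ⟨h1, by omega⟩)
          · exact Or.inl (Or.inr h)
      have hvN' : (PySem.Set.update visited front).Nodup := PySem.Set.nodup_update visited front hvN
      by_cases hmeet : ∃ w ∈ front, w ∈ back
      · rw [show pvLoopA (fuel + 1) visited step front back = step from by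
          simp only [pvLoopA, if_neg hfe, pvWordsA_none hz6f hmeet]]
        obtain ⟨w, hw, hwb⟩ := hmeet
        have h1 := (hf w).mp hw
        have h2 := (hbk w).mp hwb
        obtain ⟨hrxy, hle⟩ := pvMeet_bound h1.1 h2.1
        have hr : pvG.Reachable s t := hrxy_iff.mp hrxy
        have hge := (hbound hr).1
        have h3 := h1.2
        have h4 := h2.2
        have h5 := hdxy
        rw [pvAns_pos hr, hstep]
        have h6 : pvG.dist s t = a + b := by omega
        rw [h6]
        push_cast
        ring
      · push Not at hmeet
        obtain ⟨r, hreq, hrm, hrnd⟩ :=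
          pvWordsA_some (back := back) (visited := PySem.Set.update visited front)
            front PySem.Set.empty hmeet
        have hdge : pvG.Reachable s t → a + b + 1 ≤ pvG.dist s t := by
          intro hr
          have h1 := (hbound hr).1
          rcases Nat.lt_or_ge (a + b) (pvG.dist s t) with h | h
          · omega
          · exfalso
            have hdeq : a + b = pvG.dist x y := by omega
            obtain ⟨v, hva, hvb⟩ := pvSph_mid (hrxy_iff.mpr hr) a b hdeq
            exact hmeet v ((hf v).mpr hva) ((hbk v).mpr hvb)
        have hrS : ∀ v, v ∈ r ↔ pvSph x v (a + 1) := by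
          intro v
          rw [hrm v]
          constructor
          · rintro (h | ⟨w, hw, hnb, hnv⟩)
            · exact absurd h List.not_mem_nil
            · have hsw := (hf w).mp hw
              have hadj : pvG.Adj w v := ((pvAdj_iff (hgf w hw)).mpr hnb).symm
              exact pvSph_up hsw hadj (fun hball => hnv ((hvis' v).mpr (Or.inl hball)))
          · intro hsph
            obtain ⟨u, hu, hadj⟩ := pvSph_down hsph
            refine Or.inr ⟨u, (hf u).mpr hu, hadj.symm.2.2, fun hvv => ?_⟩
            rcases (hvis' v).mp hvv with ⟨h1, h2⟩ | ⟨h1, h2⟩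
            · have := hsph.2; omega
            · obtain ⟨hrxy2, hle2⟩ := pvMeet_bound hsph.1 h1
              have hr : pvG.Reachable s t := hrxy_iff.mp hrxy2
              have h3 := hdge hr
              have h4 := hsph.2
              have h5 := hdxy
              omega
        have hdisj : ∀ w ∈ front, w ∉ visited := by
          intro w hw hwv
          have hsw := (hf w).mp hw
          rcases (hv w).mp hwv with ⟨h1, h2⟩ | ⟨h1, h2⟩
          · have := hsw.2; omega
          · obtain ⟨hrxy2, hle2⟩ := pvMeet_bound hsw.1 h1
            have hr : pvG.Reachable s t := hrxy_iff.mp hrxy2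
            have h3 := (hbound hr).1
            have h4 := hsw.2
            have h5 := hdxy
            omega
        have hlen' : (PySem.Set.update visited front).length = visited.length + front.length := by
          rw [PySem.Set.update_eq_append_of_disjoint visited front hfN hdisj,
            List.length_append]
        have hfpos : 1 ≤ front.length := by
          cases front with
          | nil => exact absurd rfl hfe
          | cons _ _ => simp
        have hbound' : pvG.Reachable s t →
            (a + 1) + b ≤ pvG.dist s t ∧
              722 ≤ fuel + (PySem.Set.update visited front).length := by
          intro hr
          have h1 := hdge hr
          have h2 := (hbound hr).2
          exact ⟨by omega, by omega⟩
        have hrnd' : r.Nodup := hrnd List.nodup_nil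
        rw [show pvLoopA (fuel + 1) visited step front back =
            (if r.length > back.length then
              pvLoopA fuel (PySem.Set.update visited front) (step + 1) back r
            else
              pvLoopA fuel (PySem.Set.update visited front) (step + 1) r back) from by
          simp only [pvLoopA, if_neg hfe, hreq]]
        by_cases hswp : r.length > back.length
        · rw [if_pos hswp]
          apply ih
          refine ⟨hgs, hgt, y, x, b, a + 1, ?_, by rw [hstep]; push_cast; ring,
            hbN, hrnd', hvN', hbk, hrS, ?_, ?_⟩
          · rcases hxy with ⟨rfl, rfl⟩ | ⟨rfl, rfl⟩
            · exact Or.inr ⟨rfl, rfl⟩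
            · exact Or.inl ⟨rfl, rfl⟩
          · intro v
            rw [hvis' v]
            exact Or.comm
          · intro hr
            obtain ⟨h1, h2⟩ := hbound' hr
            exact ⟨by omega, h2⟩
        · rw [if_neg hswp]
          apply ih
          exact ⟨hgs, hgt, x, y, a + 1, b, hxy, by rw [hstep]; push_cast; ring,
            hrnd', hbN, hvN', hrS, hbk, hvis', hbound'⟩

def pvInvB (s : List Char) (fuel : Nat) (visited : PySem.Set (List Char))
    (frontier : List (List Char)) (dist : Int) : Prop :=
  pvGood s ∧ s ≠ pvTarget ∧
  ∃ k : Nat, dist = (k : Int) ∧ frontier.Nodup ∧ visited.Nodup ∧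
    (∀ v, v ∈ frontier ↔ pvSph s v k) ∧
    (∀ v, v ∈ visited ↔ pvBallLt s v (k + 1)) ∧
    (pvG.Reachable s pvTarget →
      k + 1 ≤ pvG.dist s pvTarget ∧ 722 ≤ fuel + visited.length)

theorem pvLoopB_correct (fuel : Nat) :
    ∀ (visited : PySem.Set (List Char)) (frontier : List (List Char)) (dist : Int)
      (s : List Char),
    pvInvB s fuel visited frontier dist →
    pvLoopB fuel visited frontier dist = pvAns s pvTarget := by
  induction fuel with
  | zero =>
    intro visited frontier dist s hinv
    obtain ⟨hgs, hst, k, hdist, hfN, hvN, hf, hvis, hbound⟩ := hinv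
    by_cases hr : pvG.Reachable s pvTarget
    · exfalso
      obtain ⟨-, h722⟩ := hbound hr
      have hgood : ∀ v ∈ visited, pvGood v := fun v hv =>
        pvReachable_good hgs ((hvis v).mp hv).1
      have := pvGood_card_bound hvN hgood
      omega
    · rw [pvAns_neg hr]; rfl
  | succ fuel ih =>
    intro visited frontier dist s hinv
    obtain ⟨hgs, hst, k, hdist, hfN, hvN, hf, hvis, hbound⟩ := hinv
    by_cases hfe : frontier = []
    · subst hfe
      rw [show pvLoopB (fuel + 1) visited [] dist = -1 from by simp [pvLoopB]]
      by_cases hr : pvG.Reachable s pvTarget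
      · exfalso
        obtain ⟨hk1, -⟩ := hbound hr
        obtain ⟨v, hv1, -⟩ := pvSph_mid hr k (pvG.dist s pvTarget - k) (by omega)
        exact List.not_mem_nil ((hf v).mpr hv1)
      · rw [pvAns_neg hr]
    · have hgf : ∀ w ∈ frontier, pvGood w := fun w hw =>
        pvReachable_good hgs ((hf w).mp hw).1
      by_cases hhit : ∃ w ∈ frontier, pvTarget ∈ pvNbrs w
      · rw [show pvLoopB (fuel + 1) visited frontier dist = dist + 1 from by
          simp only [pvLoopB, if_neg hfe, pvWordsB_none hhit]]
        obtain ⟨w, hw, hnbr⟩ := hhit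
        have hsw := (hf w).mp hw
        have hadj : pvG.Adj pvTarget w := (pvAdj_iff (hgf w hw)).mpr hnbr
        have hr : pvG.Reachable s pvTarget := hsw.1.trans hadj.symm.reachable
        have h1 : pvG.dist s pvTarget ≤ pvG.dist s w + pvG.dist w pvTarget :=
          SimpleGraph.Reachable.dist_triangle_right hadj.symm.reachable s
        have h2 : pvG.dist w pvTarget = 1 := SimpleGraph.dist_eq_one_iff_adj.mpr hadj.symm
        have h3 := (hbound hr).1
        have h4 := hsw.2
        rw [pvAns_pos hr, hdist]
        have : pvG.dist s pvTarget = k + 1 := by omega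
        rw [this]
        push_cast
        ring
      · push Not at hhit
        obtain ⟨vis', nxt', heq, hvm, hnm, hs', hv', hn', d, hd1, hd2⟩ :=
          pvWordsB_some frontier visited [] hhit
            (by intro v hv; exact absurd hv List.not_mem_nil) hvN (by simp)
        rw [show pvLoopB (fuel + 1) visited frontier dist
            = pvLoopB fuel vis' nxt' (dist + 1) from by
          simp only [pvLoopB, if_neg hfe, heq]]
        -- reachable case: the distance is at least k+2
        have hdge : pvG.Reachable s pvTarget → k + 2 ≤ pvG.dist s pvTarget := by
          intro hr
          have h1 := (hbound hr).1
          rcases Nat.lt_or_ge (k + 1) (pvG.dist s pvTarget) with h | h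
          · omega
          · exfalso
            have hdk : pvG.dist s pvTarget = k + 1 := by omega
            obtain ⟨u, hu, hadj⟩ := pvSph_down (x := s) (v := pvTarget) ⟨hr, hdk⟩
            exact hhit u ((hf u).mpr hu) hadj.symm.2.2
        -- the new frontier is the (k+1)-sphere
        have hfront' : ∀ v, v ∈ nxt' ↔ pvSph s v (k + 1) := by
          intro v
          rw [hnm v]
          constructor
          · rintro (h | ⟨⟨w, hw, hnb⟩, hnv⟩)
            · exact absurd h List.not_mem_nil
            · have hsw := (hf w).mp hw
              have hadj : pvG.Adj w v := ((pvAdj_iff (hgf w hw)).mpr hnb).symm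
              exact pvSph_up hsw hadj (fun hb => hnv ((hvis v).mpr hb))
          · intro hsph
            obtain ⟨u, hu, hadj⟩ := pvSph_down hsph
            refine Or.inr ⟨⟨u, (hf u).mpr hu, hadj.symm.2.2⟩, fun hvv => ?_⟩
            have h5 := ((hvis v).mp hvv).2
            have h6 := hsph.2
            omega
        -- the new visited set is the closed (k+1)-ball
        have hvis' : ∀ v, v ∈ vis' ↔ pvBallLt s v (k + 2) := by
          intro v
          rw [hvm v]
          constructor
          · rintro (h | ⟨w, hw, hnb⟩)
            · obtain ⟨h1, h2⟩ := (hvis v).mp h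
              exact ⟨h1, by omega⟩
            · have hsw := (hf w).mp hw
              have hadj : pvG.Adj w v := ((pvAdj_iff (hgf w hw)).mpr hnb).symm
              have h1 : pvG.dist s v ≤ pvG.dist s w + pvG.dist w v :=
                SimpleGraph.Reachable.dist_triangle_right hadj.reachable s
              have h2 : pvG.dist w v = 1 := SimpleGraph.dist_eq_one_iff_adj.mpr hadj
              have h3 := hsw.2
              exact ⟨hsw.1.trans hadj.reachable, by omega⟩
          · rintro ⟨hrv, hlt⟩
            rcases Nat.lt_or_ge (pvG.dist s v) (k + 1) with h | h
            · exact Or.inl ((hvis v).mpr ⟨hrv, h⟩)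
            · have hdk : pvG.dist s v = k + 1 := by omega
              obtain ⟨u, hu, hadj⟩ := pvSph_down (x := s) (v := v) ⟨hrv, hdk⟩
              exact Or.inr ⟨u, (hf u).mpr hu, hadj.symm.2.2⟩
        apply ih
        refine ⟨hgs, hst, k + 1, by rw [hdist]; push_cast; ring, hn', hv', hfront', hvis', ?_⟩
        intro hr
        refine ⟨hdge hr, ?_⟩
        have h722 := (hbound hr).2
        obtain ⟨v, hv1, -⟩ := pvSph_mid hr (k + 1) (pvG.dist s pvTarget - (k + 1))
          (by have := hdge hr; omega)
        have hvmem : v ∈ nxt' := (hfront' v).mpr hv1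
        have hlen1 : 1 ≤ nxt'.length := List.length_pos_of_mem hvmem
        have hlen2 : vis'.length = visited.length + d.length := by
          rw [hd1, List.length_append]
        have hlen3 : nxt'.length = d.length := by rw [hd2]; simp
        omega

-- ## the two runners compute the same graph-distance value

theorem pvRunA_eq (s : List Char) (hs : pvGood s) :
    pvRunA s = pvAns s pvTarget := by
  unfold pvRunA
  apply pvLoopA_correct
  refine ⟨hs, List.Perm.refl pvTarget, s, pvTarget, 0, 0, Or.inl ⟨rfl, rfl⟩, by norm_num,
    by simp, by simp, by simp, ?_, ?_, ?_, ?_⟩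
  · intro v
    rw [show PySem.Set.ofList [s] = [s] from rfl]
    simp only [List.mem_singleton]
    exact (pvSph_zero s v).symm
  · intro v
    rw [show PySem.Set.ofList [pvTarget] = [pvTarget] from rfl]
    simp only [List.mem_singleton]
    exact (pvSph_zero pvTarget v).symm
  · intro v
    constructor
    · intro h
      exact absurd h List.not_mem_nil
    · rintro (⟨-, h⟩ | ⟨-, h⟩) <;> omega
  · intro hr
    exact ⟨by omega, by simp⟩

theorem pvRunB_eq (s : List Char) (hs : pvGood s) :
    pvRunB s = pvAns s pvTarget := by
  unfold pvRunB
  by_cases hst : s = pvTarget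
  · rw [if_pos hst, hst, pvAns_pos (SimpleGraph.Reachable.refl _)]
    simp
  · rw [if_neg hst]
    apply pvLoopB_correct
    refine ⟨hs, hst, 0, rfl, by simp, PySem.Set.nodup_ofList [s], ?_, ?_, ?_⟩
    · intro v
      simp only [List.mem_singleton]
      exact (pvSph_zero s v).symm
    · intro v
      rw [PySem.Set.mem_ofList, List.mem_singleton]
      constructor
      · rintro rfl
        exact ⟨SimpleGraph.Reachable.refl _, by simp⟩
      · rintro ⟨h1, h2⟩
        have : pvG.dist s v = 0 := by omega
        exact ((h1.dist_eq_zero_iff).mp this).symm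
    · intro hr
      refine ⟨?_, by rw [show PySem.Set.ofList [s] = [s] from rfl]; simp⟩
      have : pvG.dist s pvTarget ≠ 0 := fun h0 => hst ((hr.dist_eq_zero_iff).mp h0)
      omega

-- ## glue: a Pre_-admissible board encodes to a good word

theorem pvWordOf_eq (board : List (List Int)) :
    pvWordOf board = board.flatten.flatMap (fun n => PySem.Int.toChars n) := by
  induction board with
  | nil => rfl
  | cons row rows ih =>
    simp only [pvWordOf, List.flatMap_cons, List.flatten_cons, List.flatten_append,
      List.flatMap_append] at *
    rw [← ih]
    simp [List.flatMap_def]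

theorem pvWordOf_eq_preWord (board : List (List Int)) :
    pvWordOf board = pvPreWord board := pvWordOf_eq board

-- ## the junk case: a word that is not a permutation of the target, but is at least 6
-- characters long with a '0' among its first six characters.  The first six positions are
-- only ever permuted among themselves, the two searches explore disjoint permutation
-- classes, so they never meet and both programs return -1.

-- v and w0 agree beyond position 5 and their first six characters are permutations
def pvClassEq (w0 v : List Char) : Prop :=
  List.Perm (v.take 6) (w0.take 6) ∧ v.drop 6 = w0.drop 6

theorem pvClassEq_refl (w0 : List Char) : pvClassEq w0 w0 := ⟨List.Perm.refl _, rfl⟩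

theorem pvClassEq_perm {w0 v : List Char} (h : pvClassEq w0 v) : List.Perm v w0 := by
  rw [← List.take_append_drop 6 v, ← List.take_append_drop 6 w0]
  exact h.1.append (h.2 ▸ List.Perm.refl _)

theorem pvClassEq_good_iff {w0 v : List Char} (h : pvClassEq w0 v) :
    pvGood v ↔ pvGood w0 :=
  ⟨fun g => (pvClassEq_perm h).symm.trans g, fun g => (pvClassEq_perm h).trans g⟩

theorem pvZero_lt6 {v : List Char} (h : '0' ∈ v.take 6) : pvZero v < 6 := by
  obtain ⟨i, hi, hget⟩ := List.mem_take_iff_getElem.mp h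
  have hi6 : i < 6 := lt_of_lt_of_le hi (min_le_left _ _)
  have hiv : i < v.length := lt_of_lt_of_le hi (min_le_right _ _)
  have hmem : '0' ∈ v := hget ▸ List.getElem_mem hiv
  obtain ⟨z, hz⟩ := Option.isSome_iff_exists.mp ((PySem.List.index?_isSome_iff v '0').mpr hmem)
  obtain ⟨hlt, hgz, hfirst⟩ := PySem.List.getElem_of_index?_eq_some hz
  have hzeq : pvZero v = z := by unfold pvZero; rw [hz]; rfl
  rw [hzeq]
  by_contra h6
  exact hfirst i (by omega) hget

theorem pvClassEq_zero {w0 v : List Char} (h : pvClassEq w0 v) (h0 : '0' ∈ w0.take 6) :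
    '0' ∈ v.take 6 := h.1.mem_iff.mpr h0

theorem pvClassEq_nbr {w0 v u : List Char} (hL : 6 ≤ w0.length) (h0 : '0' ∈ w0.take 6)
    (hv : pvClassEq w0 v) (hu : u ∈ pvNbrs v) : pvClassEq w0 u := by
  obtain ⟨j, hj, rfl⟩ := List.mem_map.mp hu
  have hz6 : pvZero v < 6 := pvZero_lt6 (pvClassEq_zero hv h0)
  obtain ⟨hj6, -, -⟩ := pvMoves_facts _ hz6 j hj
  have hlen : v.length = w0.length := (pvClassEq_perm hv).length_eq
  have hlt6 : (v.take 6).length = 6 := by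
    rw [List.length_take]
    omega
  have hjv : j < v.length := by omega
  have hzv : pvZero v < v.length := by omega
  have hgetj : v.getD j ' ' = (v.take 6).getD j ' ' := by
    rw [List.getD_eq_getElem _ _ hjv, List.getD_eq_getElem _ _ (by omega : j < (v.take 6).length)]
    exact (List.getElem_take).symm
  have hgetz : v.getD (pvZero v) ' ' = (v.take 6).getD (pvZero v) ' ' := by
    rw [List.getD_eq_getElem _ _ hzv,
      List.getD_eq_getElem _ _ (by omega : pvZero v < (v.take 6).length)]
    exact (List.getElem_take).symm
  constructor
  · unfold pvSwap
    rw [List.take_set, List.take_set, hgetj, hgetz]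
    exact (pvSwap_perm (v.take 6) (pvZero v) j (by omega) (by omega)).trans hv.1
  · unfold pvSwap
    rw [List.drop_set, if_pos (by omega : j < 6), List.drop_set, if_pos (by omega : pvZero v < 6)]
    exact hv.2

theorem pvClassEq_not_target {w0 u : List Char} (hng : ¬ pvGood w0) (hu : pvClassEq w0 u) :
    u ≠ pvTarget := by
  intro he
  exact hng ((pvClassEq_good_iff hu).mp (by rw [he]; exact List.Perm.refl _))

theorem pvLoopA_junk (fuel : Nat) :
    ∀ (visited front back : PySem.Set (List Char)) (step : Int) (w0 : List Char),
    6 ≤ w0.length → '0' ∈ w0.take 6 → ¬ pvGood w0 →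
    (((∀ v ∈ front, pvClassEq w0 v) ∧ (∀ v ∈ back, pvGood v)) ∨
      ((∀ v ∈ front, pvGood v) ∧ (∀ v ∈ back, pvClassEq w0 v))) →
    pvLoopA fuel visited step front back = -1 := by
  induction fuel with
  | zero => intro _ _ _ _ _ _ _ _ _; rfl
  | succ fuel ih =>
    intro visited front back step w0 hL h0 hng hroles
    by_cases hfe : front = []
    · simp [pvLoopA, hfe]
    · rcases hroles with ⟨hfc, hbg⟩ | ⟨hfg, hbc⟩
      · have hnomeet : ∀ w ∈ front, w ∉ back :=
          fun w hw hwb => hng ((pvClassEq_good_iff (hfc w hw)).mp (hbg w hwb))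
        obtain ⟨r, hreq, hrm, -⟩ :=
          pvWordsA_some (back := back) (visited := PySem.Set.update visited front)
            front PySem.Set.empty hnomeet
        have hr1 : ∀ v ∈ r, pvClassEq w0 v := by
          intro v hv
          rcases (hrm v).mp hv with h | ⟨w, hw, hnb, -⟩
          · exact absurd h List.not_mem_nil
          · exact pvClassEq_nbr hL h0 (hfc w hw) hnb
        rw [show pvLoopA (fuel + 1) visited step front back =
            (if r.length > back.length then
              pvLoopA fuel (PySem.Set.update visited front) (step + 1) back r
            else
              pvLoopA fuel (PySem.Set.update visited front) (step + 1) r back) from by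
          simp only [pvLoopA, if_neg hfe, hreq]]
        by_cases hswp : r.length > back.length
        · rw [if_pos hswp]
          exact ih _ _ _ _ w0 hL h0 hng (Or.inr ⟨hbg, hr1⟩)
        · rw [if_neg hswp]
          exact ih _ _ _ _ w0 hL h0 hng (Or.inl ⟨hr1, hbg⟩)
      · have hnomeet : ∀ w ∈ front, w ∉ back :=
          fun w hw hwb => hng ((pvClassEq_good_iff (hbc w hwb)).mp (hfg w hw))
        obtain ⟨r, hreq, hrm, -⟩ :=
          pvWordsA_some (back := back) (visited := PySem.Set.update visited front)
            front PySem.Set.empty hnomeet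
        have hr1 : ∀ v ∈ r, pvGood v := by
          intro v hv
          rcases (hrm v).mp hv with h | ⟨w, hw, hnb, -⟩
          · exact absurd h List.not_mem_nil
          · exact pvNbrs_good (hfg w hw) hnb
        rw [show pvLoopA (fuel + 1) visited step front back =
            (if r.length > back.length then
              pvLoopA fuel (PySem.Set.update visited front) (step + 1) back r
            else
              pvLoopA fuel (PySem.Set.update visited front) (step + 1) r back) from by
          simp only [pvLoopA, if_neg hfe, hreq]]
        by_cases hswp : r.length > back.length
        · rw [if_pos hswp]
          exact ih _ _ _ _ w0 hL h0 hng (Or.inl ⟨hbc, hr1⟩)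
        · rw [if_neg hswp]
          exact ih _ _ _ _ w0 hL h0 hng (Or.inr ⟨hr1, hbc⟩)

theorem pvLoopB_junk (fuel : Nat) :
    ∀ (visited : PySem.Set (List Char)) (frontier : List (List Char)) (dist : Int)
      (w0 : List Char),
    6 ≤ w0.length → '0' ∈ w0.take 6 → ¬ pvGood w0 →
    (∀ v ∈ frontier, pvClassEq w0 v) → visited.Nodup → frontier.Nodup →
    pvLoopB fuel visited frontier dist = -1 := by
  induction fuel with
  | zero => intro _ _ _ _ _ _ _ _ _ _; rfl
  | succ fuel ih =>
    intro visited frontier dist w0 hL h0 hng hcls hvN hfN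
    by_cases hfe : frontier = []
    · simp [pvLoopB, hfe]
    · have hmiss : ∀ w ∈ frontier, pvTarget ∉ pvNbrs w := by
        intro w hw hnb
        exact pvClassEq_not_target hng (pvClassEq_nbr hL h0 (hcls w hw) hnb) rfl
      obtain ⟨vis', nxt', heq, hvm, hnm, hs', hv', hn', -, -, -⟩ :=
        pvWordsB_some frontier visited [] hmiss
          (by intro v hv; exact absurd hv List.not_mem_nil) hvN (by simp)
      rw [show pvLoopB (fuel + 1) visited frontier dist
          = pvLoopB fuel vis' nxt' (dist + 1) from by
        simp only [pvLoopB, if_neg hfe, heq]]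
      apply ih _ _ _ w0 hL h0 hng ?_ hv' hn'
      intro v hv
      rcases (hnm v).mp hv with h | ⟨⟨w, hw, hnb⟩, -⟩
      · exact absurd h List.not_mem_nil
      · exact pvClassEq_nbr hL h0 (hcls w hw) hnb

theorem pvRunA_junk (w : List Char) (hL : 6 ≤ w.length) (h0 : '0' ∈ w.take 6)
    (hng : ¬ pvGood w) : pvRunA w = -1 := by
  unfold pvRunA
  apply pvLoopA_junk _ _ _ _ _ w hL h0 hng
  left
  constructor
  · intro v hv
    rw [show PySem.Set.ofList [w] = [w] from rfl, List.mem_singleton] at hv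
    rw [hv]
    exact pvClassEq_refl w
  · intro v hv
    rw [show PySem.Set.ofList [pvTarget] = [pvTarget] from rfl, List.mem_singleton] at hv
    rw [hv]
    exact List.Perm.refl _

theorem pvRunB_junk (w : List Char) (hL : 6 ≤ w.length) (h0 : '0' ∈ w.take 6)
    (hng : ¬ pvGood w) : pvRunB w = -1 := by
  unfold pvRunB
  rw [if_neg (fun he => hng (by rw [he]; exact List.Perm.refl _))]
  apply pvLoopB_junk _ _ _ _ w hL h0 hng
  · intro v hv
    rw [List.mem_singleton] at hv
    rw [hv]
    exact pvClassEq_refl w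
  · exact PySem.Set.nodup_ofList [w]
  · simp

-- ===== VERDICT (by name: the statement is the Claim_ definition above) =====
theorem slidingPuzzle_spec : Claim_equal_slidingPuzzle := by
  intro board _hdom hpre
  obtain ⟨hL, h0⟩ := hpre
  unfold Spec_slidingPuzzle slidingPuzzle slidingPuzzle_alt
  rw [pvWordOf_eq_preWord]
  by_cases hg : pvGood (pvPreWord board)
  · rw [pvRunA_eq _ hg, pvRunB_eq _ hg]
  · rw [pvRunA_junk _ hL h0 hg, pvRunB_junk _ hL h0 hg]
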